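-- pv_equiv track=rewrite | github.com/LeeJY0116/Practice | python/report/2_09/345-scores-16.py | removeMinimum
-- ===== SOURCE A (Python) =====
-- def removeMinimum(values, count) :                              # values에서 count만큼 최소값을 삭제하는 함수입니다.
--     for i in range(count) :                                     # count만큼 반복하는 for문입니다.
--         minNumber = 0
--         try :
--             for j in range(len(values)) :                       # 최소값의 인덱스를 찾아내는 for문입니다.
--                 if values[j] < values[minNumber] :
--                     minNumber = j
--             values.pop(minNumber)                               # 최소값을 삭제합니다.
--         except IndexError:
--             continue
--     return values
-- ===== SOURCE B (Python) =====
-- def removeMinimum(values, count):                       # B: sort once, drop below-threshold values and the right number of threshold ties, one pass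
--     n = len(values)
--     k = count if count < n else n
--     if k <= 0:
--         return values
--     s = sorted(values)
--     t = s[k - 1]                                        # threshold: the k-th smallest value
--     r = k - sum(1 for v in values if v < t)             # how many copies of t are among the k smallest
--     out = []
--     for v in values:
--         if v > t:
--             out.append(v)
--         elif v == t and r <= 0:
--             out.append(v)
--         elif v == t:
--             r -= 1
--     values[:] = out
--     return values
-- ===== Notes on version B (the rewrite author's own statement) =====
-- stated objective: faster
-- what changed: Instead of count passes each scanning for the first minimum and popping it, B sorts once, derives the k-th-smallest threshold value and the number of threshold ties to drop, and builds the result in a single pass over the original order.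
import Mathlib
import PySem

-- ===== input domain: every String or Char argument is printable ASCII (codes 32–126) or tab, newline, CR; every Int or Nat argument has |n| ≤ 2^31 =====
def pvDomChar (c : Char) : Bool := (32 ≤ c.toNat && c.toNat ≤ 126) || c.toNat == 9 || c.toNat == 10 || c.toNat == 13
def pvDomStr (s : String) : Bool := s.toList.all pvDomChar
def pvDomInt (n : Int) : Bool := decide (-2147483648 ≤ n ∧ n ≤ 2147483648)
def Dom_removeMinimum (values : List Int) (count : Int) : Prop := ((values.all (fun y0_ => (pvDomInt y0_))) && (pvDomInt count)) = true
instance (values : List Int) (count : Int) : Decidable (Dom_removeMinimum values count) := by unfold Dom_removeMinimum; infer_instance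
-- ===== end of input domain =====

-- B replaces A's count scan-and-pop passes (scan for the first minimum, pop it) by one sort plus a single
-- threshold pass; both Pythons mutate the list argument in place, the theorems below are about the returned value.

-- ===== PORT A =====
-- one iteration of A's outer loop: find the index of the first minimum, pop it ('continue' keeps vs on IndexError)
def stepA (vs : List Int) : List Int :=
  let minNumber : Int := (PySem.List.pyRange 0 (vs.length : Int) 1).foldl (fun m j =>
    match PySem.List.pyGet? vs j, PySem.List.pyGet? vs m with
    | some vj, some vm => if vj < vm then j else m
    | _, _ => m) 0
  match PySem.List.pop? vs minNumber with
  | some (_, vs') => vs'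
  | none => vs

def removeMinimum (values : List Int) (count : Int) : List Int :=
  (PySem.List.pyRange 0 count 1).foldl (fun vs _ => stepA vs) values

-- ===== PORT B =====
-- the output pass of Source B: keep v > t; keep v = t only once r copies have been skipped
def bFilter (t : Int) : List Int → Int → List Int
  | [], _ => []
  | v :: rest, r =>
    if t < v then v :: bFilter t rest r
    else if v = t then (if r ≤ 0 then v :: bFilter t rest r else bFilter t rest (r - 1))
    else bFilter t rest r

def removeMinimum_alt (values : List Int) (count : Int) : List Int :=
  let n : Int := values.length
  let k : Int := if count < n then count else n
  if k ≤ 0 then values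
  else
    let s := PySem.List.sorted values (fun x => x) false
    let t : Int := PySem.List.pyGetD s (k - 1) 0
    let r : Int := k - (values.countP (fun v => decide (v < t)) : Int)
    bFilter t values r

-- ===== PRECONDITION & SPEC =====
def Spec_removeMinimum (values : List Int) (count : Int) (out : List Int) : Prop := out = removeMinimum_alt values count
instance (values : List Int) (count : Int) (out : List Int) : Decidable (Spec_removeMinimum values count out) := by unfold Spec_removeMinimum; infer_instance

-- ===== CLAIM (what is proved, stated in full; the proofs are below) =====
def Claim_equal_removeMinimum : Prop := ∀ (values : List Int) (count : Int), Dom_removeMinimum values count → Spec_removeMinimum values count (removeMinimum values count)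

-- ===== LEMMAS AND PROOFS =====

theorem argmin_spec (vs : List Int) (hvs : vs ≠ []) (n : Nat) (hn : n ≤ vs.length) :
    ∃ (m : Nat) (hm : m < vs.length),
      (PySem.List.pyRange 0 (n : Int) 1).foldl (fun m j =>
        match PySem.List.pyGet? vs j, PySem.List.pyGet? vs m with
        | some vj, some vm => if vj < vm then j else m
        | _, _ => m) 0 = (m : Int) ∧ m < max n 1 ∧
      (∀ j (hj : j < n), vs[m] ≤ vs[j]'(by omega)) ∧ (∀ i (hi : i < m), vs[m] < vs[i]'(by omega)) := by
  induction n with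
  | zero =>
    refine ⟨0, by cases vs <;> simp_all, ?_, by omega, by omega, by omega⟩
    simp [PySem.List.pyRange_one_eq_nil]
  | succ n ih =>
    obtain ⟨m, hm, heq, hlt, hmin, hfirst⟩ := ih (by omega)
    rw [show ((n+1 : Nat) : Int) = (n : Int) + 1 by push_cast; ring,
        PySem.List.pyRange_one_succ_right (by positivity), List.foldl_append, heq]
    simp only [List.foldl_cons, List.foldl_nil, PySem.List.pyGet?_natCast]
    rw [List.getElem?_eq_getElem (by omega), List.getElem?_eq_getElem hm]
    by_cases hc : vs[n] < vs[m]
    · refine ⟨n, by omega, by show (if vs[n] < vs[m] then (n:Int) else (m:Int)) = (n:Int); rw [if_pos hc], by omega, ?_, ?_⟩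
      · intro j hj
        rcases Nat.lt_succ_iff_lt_or_eq.mp hj with h | h
        · exact le_of_lt (lt_of_lt_of_le hc (hmin j h))
        · subst h; rfl
      · intro i hi
        by_cases him : i < m
        · exact lt_trans hc (hfirst i him)
        · exact lt_of_lt_of_le hc (hmin i (by omega))
    · refine ⟨m, hm, by show (if vs[n] < vs[m] then (n:Int) else (m:Int)) = (m:Int); rw [if_neg hc], by omega, ?_, hfirst⟩
      intro j hj
      rcases Nat.lt_succ_iff_lt_or_eq.mp hj with h | h
      · exact hmin j h
      · subst h; omega

theorem eraseIdx_eq_erase (vs : List Int) (m : Nat) (h : m < vs.length)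
    (hfirst : ∀ i (hi : i < m), vs[i]'(by omega) ≠ vs[m]) :
    vs.eraseIdx m = vs.erase vs[m] := by
  induction vs generalizing m with
  | nil => simp at h
  | cons v rest ih =>
    cases m with
    | zero => simp
    | succ j =>
      have hv : v ≠ (v :: rest)[j+1] := hfirst 0 (by omega)
      simp only [List.getElem_cons_succ] at hv ⊢
      rw [List.eraseIdx_cons_succ, List.erase_cons_tail (by simpa using hv)]
      rw [ih j (by simpa using h) (fun i hi => hfirst (i+1) (by omega))]

theorem stepA_eq (vs : List Int) (hvs : vs ≠ []) :
    ∃ (m : Nat) (hm : m < vs.length),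
      stepA vs = vs.erase vs[m] ∧ (∀ j (hj : j < vs.length), vs[m] ≤ vs[j]) ∧
      (∀ i (hi : i < m), vs[m] < vs[i]'(by omega)) := by
  obtain ⟨m, hm, heq, -, hmin, hfirst⟩ := argmin_spec vs hvs vs.length le_rfl
  refine ⟨m, hm, ?_, hmin, hfirst⟩
  unfold stepA
  simp only [heq, PySem.List.pop?_natCast vs m hm]
  exact eraseIdx_eq_erase vs m hm (fun i hi => ne_of_gt (hfirst i hi))

theorem stepA_nil : stepA [] = [] := by decide

theorem bFilter_nonpos (t : Int) (vs : List Int) (r : Int) (hr : r ≤ 0)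
    (hall : ∀ v ∈ vs, t ≤ v) : bFilter t vs r = vs := by
  induction vs with
  | nil => rfl
  | cons v rest ih =>
    have hv := hall v (by simp)
    by_cases h : t < v
    · simp [bFilter, h, ih (fun w hw => hall w (by simp [hw]))]
    · have : v = t := le_antisymm (by omega) hv
      simp [bFilter, this, hr, ih (fun w hw => hall w (by simp [hw]))]

theorem bFilter_one (t : Int) (vs : List Int) (hall : ∀ v ∈ vs, t ≤ v) :
    bFilter t vs 1 = vs.erase t := by
  induction vs with
  | nil => rfl
  | cons v rest ih =>
    have hv := hall v (by simp)
    by_cases h : v = t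
    · subst h
      simp [bFilter, List.erase_cons_head,
        bFilter_nonpos v rest 0 le_rfl (fun w hw => hall w (by simp [hw]))]
    · have ht : t < v := lt_of_le_of_ne hv (fun he => h he.symm)
      rw [List.erase_cons_tail (by simpa using h)]
      simp [bFilter, ht, ih (fun w hw => hall w (by simp [hw]))]

theorem bFilter_erase_lt (t h : Int) (vs : List Int) (hht : h < t) (hmem : h ∈ vs) :
    ∀ r : Int, bFilter t (vs.erase h) r = bFilter t vs r := by
  induction vs with
  | nil => simp at hmem
  | cons v rest ih =>
    intro r
    by_cases hv : v = h
    · subst hv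
      simp [bFilter, List.erase_cons_head, show ¬ t < v by omega, show v ≠ t by omega]
    · have hmem' : h ∈ rest := by
        rcases List.mem_cons.mp hmem with h1 | h1
        · exact absurd h1.symm hv
        · exact h1
      rw [List.erase_cons_tail (by simpa using hv)]
      by_cases h1 : t < v
      · simp [bFilter, h1, ih hmem' r]
      · by_cases h2 : v = t
        · by_cases h3 : r ≤ 0 <;> simp [bFilter, h2, h3, ih hmem']
        · simp [bFilter, h1, h2, ih hmem' r]

theorem bFilter_erase_eq (t : Int) (vs : List Int) (hall : ∀ v ∈ vs, t ≤ v) :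
    ∀ r : Int, 0 ≤ r → bFilter t (vs.erase t) r = bFilter t vs (r + 1) := by
  induction vs with
  | nil => intro r _; rfl
  | cons v rest ih =>
    intro r hr
    have hv := hall v (by simp)
    by_cases h : v = t
    · subst h
      simp [bFilter, List.erase_cons_head, show ¬ (r + 1 ≤ 0) by omega]
    · have ht : t < v := lt_of_le_of_ne hv (fun he => h he.symm)
      rw [List.erase_cons_tail (by simpa using h)]
      simp [bFilter, ht, ih (fun w hw => hall w (by simp [hw])) r hr]

def iterA : Nat → List Int → List Int
  | 0, vs => vs
  | n + 1, vs => iterA n (stepA vs)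

-- structure of the head of the sorted list vs erase
theorem sorted_head_erase (vs : List Int) (hd : Int) (tl : List Int)
    (heq : PySem.List.sorted vs (fun x => x) false = hd :: tl) :
    hd ∈ vs ∧ (∀ y ∈ vs, hd ≤ y) ∧ tl.Perm (vs.erase hd) ∧
      PySem.List.sorted (vs.erase hd) (fun x => x) false = tl := by
  have hmem : hd ∈ vs := by
    rw [← PySem.List.mem_sorted vs (fun x => x) false, heq]; simp
  have hall : ∀ y ∈ vs, hd ≤ y := by
    have := PySem.List.key_head_sorted_le vs (fun x => x) heq
    simpa using this
  have hperm : tl.Perm (vs.erase hd) := by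
    have h1 : (hd :: tl).Perm (hd :: vs.erase hd) :=
      (heq ▸ PySem.List.sorted_perm vs (fun x => x) false).trans (List.perm_cons_erase hmem)
    exact h1.cons_inv
  have hpw : tl.Pairwise (fun a b => a ≤ b) := by
    have := PySem.List.sorted_pairwise vs (fun x => x)
    rw [heq] at this
    exact (List.pairwise_cons.mp this).2
  exact ⟨hmem, hall, hperm, PySem.List.sorted_id_eq_of_perm_of_pairwise _ tl hperm hpw⟩

theorem stepA_erase_head (vs : List Int) (hd : Int) (tl : List Int)
    (heq : PySem.List.sorted vs (fun x => x) false = hd :: tl) :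
    stepA vs = vs.erase hd := by
  have hvs : vs ≠ [] := by
    intro h
    rw [(PySem.List.sorted_eq_nil_iff vs (fun x => x) false).mpr h] at heq
    cases heq
  obtain ⟨hmem, hall, -, -⟩ := sorted_head_erase vs hd tl heq
  obtain ⟨m, hm, hstep, hmin, -⟩ := stepA_eq vs hvs
  have hv : vs[m] = hd := by
    obtain ⟨j, hj, hjv⟩ := List.mem_iff_getElem.mp hmem
    exact le_antisymm (hjv ▸ hmin j hj) (hall _ (List.getElem_mem hm))
  rw [hstep, hv]

theorem main_lemma : ∀ (k : Nat) (vs : List Int) (hk : k + 1 ≤ vs.length),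
    iterA (k+1) vs =
      bFilter ((PySem.List.sorted vs (fun x => x) false)[k]'
          (by rw [PySem.List.length_sorted]; omega)) vs
        ((k : Int) + 1 - (vs.countP (fun v => decide (v < (PySem.List.sorted vs (fun x => x) false)[k]'
          (by rw [PySem.List.length_sorted]; omega))) : Int)) := by
  intro k
  induction k with
  | zero =>
    intro vs hk
    obtain ⟨hd, tl, heq⟩ : ∃ hd tl, PySem.List.sorted vs (fun x => x) false = hd :: tl := by
      rcases h : PySem.List.sorted vs (fun x => x) false with _ | ⟨hd, tl⟩
      · rw [PySem.List.sorted_eq_nil_iff] at h; subst h; simp at hk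
      · exact ⟨hd, tl, rfl⟩
    obtain ⟨hmem, hall, -, -⟩ := sorted_head_erase vs hd tl heq
    have ht0 : (PySem.List.sorted vs (fun x => x) false)[0]'
        (by rw [PySem.List.length_sorted]; omega) = hd := by simp [heq]
    have hc : vs.countP (fun v => decide (v < hd)) = 0 := by
      rw [List.countP_eq_zero]
      intro v hv
      simpa using not_lt.mpr (hall v hv)
    show iterA 0 (stepA vs) = _
    show stepA vs = _
    rw [stepA_erase_head vs hd tl heq]
    simp only [ht0, hc]
    norm_num [bFilter_one hd vs hall]
  | succ k ih =>
    intro vs hk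
    obtain ⟨hd, tl, heq⟩ : ∃ hd tl, PySem.List.sorted vs (fun x => x) false = hd :: tl := by
      rcases h : PySem.List.sorted vs (fun x => x) false with _ | ⟨hd, tl⟩
      · rw [PySem.List.sorted_eq_nil_iff] at h; subst h; simp at hk
      · exact ⟨hd, tl, rfl⟩
    obtain ⟨hmem, hall, hperm, hsort'⟩ := sorted_head_erase vs hd tl heq
    have hlen' : (vs.erase hd).length = vs.length - 1 := List.length_erase_of_mem hmem
    have hk' : k + 1 ≤ (vs.erase hd).length := by omega
    have hstep : iterA (k+2) vs = iterA (k+1) (vs.erase hd) := by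
      show iterA (k+1) (stepA vs) = _
      rw [stepA_erase_head vs hd tl heq]
    have hlt : k < tl.length := by
      have := PySem.List.length_sorted vs (fun x => x) false
      rw [heq] at this; simp at this; omega
    have htv : (PySem.List.sorted vs (fun x => x) false)[k+1]'
        (by rw [PySem.List.length_sorted]; omega) = tl[k] := by simp [heq]
    have ht' : (PySem.List.sorted (vs.erase hd) (fun x => x) false)[k]'
        (by rw [PySem.List.length_sorted]; omega) = tl[k] := by simp [hsort']
    set t := tl[k] with htdef
    have hhd_le : hd ≤ t := by
      have h0 : (PySem.List.sorted vs (fun x => x) false)[0]'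
          (by rw [PySem.List.length_sorted]; omega) = hd := by simp [heq]
      have := PySem.List.sorted_id_getElem_mono vs (p := 0) (q := k+1) (by omega)
        (by rw [PySem.List.length_sorted]; omega)
      rw [htv] at this
      simpa [h0] using this
    have hcount : (vs.erase hd).countP (fun v => decide (v < t)) + (if hd < t then 1 else 0)
        = vs.countP (fun v => decide (v < t)) := by
      have h1 : vs.countP (fun v => decide (v < t)) =
          (hd :: vs.erase hd).countP (fun v => decide (v < t)) :=
        (List.perm_cons_erase hmem).countP_eq _
      rw [h1, List.countP_cons]
      simp
    rw [hstep, ih (vs.erase hd) hk', ht', htv]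
    by_cases hcase : hd < t
    · rw [bFilter_erase_lt t hd vs hcase hmem]
      congr 1
      rw [if_pos hcase] at hcount
      omega
    · have hteq : hd = t := le_antisymm hhd_le (by omega)
      have hallt : ∀ v ∈ vs, t ≤ v := fun v hv => hteq ▸ hall v hv
      have hc0 : vs.countP (fun v => decide (v < t)) = 0 := by
        rw [List.countP_eq_zero]; intro v hv; simpa using not_lt.mpr (hallt v hv)
      have hc0' : (vs.erase hd).countP (fun v => decide (v < t)) = 0 := by omega
      rw [hc0, hc0', hteq]
      have hbe := bFilter_erase_eq t vs hallt ((k : Int) + 1) (by omega)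
      convert hbe using 2

theorem iterA_nil : ∀ n : Nat, iterA n [] = []
  | 0 => rfl
  | n + 1 => by rw [show iterA (n+1) [] = iterA n (stepA []) from rfl, stepA_nil, iterA_nil n]

theorem iterA_add (a b : Nat) : ∀ vs : List Int, iterA (a + b) vs = iterA b (iterA a vs) := by
  induction a with
  | zero => intro vs; simp [iterA]
  | succ a ih =>
    intro vs
    rw [show a + 1 + b = (a + b) + 1 by omega]
    show iterA (a + b) (stepA vs) = _
    rw [ih (stepA vs)]
    rfl

theorem length_stepA (vs : List Int) (hvs : vs ≠ []) : (stepA vs).length = vs.length - 1 := by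
  obtain ⟨hd, tl, heq⟩ : ∃ hd tl, PySem.List.sorted vs (fun x => x) false = hd :: tl := by
    rcases h : PySem.List.sorted vs (fun x => x) false with _ | ⟨hd, tl⟩
    · rw [PySem.List.sorted_eq_nil_iff] at h; exact absurd h hvs
    · exact ⟨hd, tl, rfl⟩
  obtain ⟨hmem, -, -, -⟩ := sorted_head_erase vs hd tl heq
  rw [stepA_erase_head vs hd tl heq]
  exact List.length_erase_of_mem hmem

theorem length_iterA : ∀ (n : Nat) (vs : List Int), n ≤ vs.length → (iterA n vs).length = vs.length - n := by
  intro n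
  induction n with
  | zero => intro vs _; rfl
  | succ n ih =>
    intro vs hn
    have hvs : vs ≠ [] := by intro h; subst h; simp at hn
    show (iterA n (stepA vs)).length = _
    rw [ih (stepA vs) (by rw [length_stepA vs hvs]; omega), length_stepA vs hvs]
    omega

theorem foldl_stepA : ∀ (l : List Int) (vs : List Int),
    l.foldl (fun vs _ => stepA vs) vs = iterA l.length vs := by
  intro l
  induction l with
  | nil => intro vs; rfl
  | cons x xs ih =>
    intro vs
    rw [List.foldl_cons, ih (stepA vs), List.length_cons]
    rw [show xs.length + 1 = 1 + xs.length by omega, iterA_add 1 xs.length vs]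
    rfl

theorem length_pyRange_nat : ∀ n : Nat, (PySem.List.pyRange 0 (n : Int) 1).length = n := by
  intro n
  induction n with
  | zero => simp [PySem.List.pyRange_one_eq_nil]
  | succ n ih =>
    rw [show ((n + 1 : Nat) : Int) = (n : Int) + 1 by push_cast; ring,
      PySem.List.pyRange_one_succ_right (by positivity), List.length_append, ih]
    simp

theorem main_glue (values : List Int) (count : Int) :
    removeMinimum values count = removeMinimum_alt values count := by
  have hA : removeMinimum values count = iterA (PySem.List.pyRange 0 count 1).length values :=
    foldl_stepA _ _
  by_cases hc0 : count ≤ 0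
  · rw [hA, PySem.List.pyRange_one_eq_nil (by omega)]
    simp only [removeMinimum_alt]
    rw [if_pos (by split_ifs <;> omega)]
    rfl
  · replace hc0 : 0 < count := by omega
    have hK : count = ((count.toNat : Nat) : Int) := by omega
    have hlenR : (PySem.List.pyRange 0 count 1).length = count.toNat := by
      rw [hK]; exact length_pyRange_nat count.toNat
    by_cases hn : values.length = 0
    · have hv : values = [] := List.length_eq_zero_iff.mp hn
      subst hv
      rw [hA, hlenR, iterA_nil]
      simp only [removeMinimum_alt]
      rw [if_pos (by simp; omega)]
    · -- 1 ≤ values.length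
      have hn1 : 1 ≤ values.length := by omega
      by_cases hlt : count < (values.length : Int)
      · -- k = count, kN = count.toNat
        have hkN1 : 1 ≤ count.toNat := by omega
        have hkNn : count.toNat ≤ values.length := by omega
        have hmain := main_lemma (count.toNat - 1) values (by omega)
        simp only [show count.toNat - 1 + 1 = count.toNat from by omega] at hmain
        rw [hA, hlenR, hmain]
        simp only [removeMinimum_alt]
        rw [if_pos hlt, if_neg (by omega)]
        have hget : PySem.List.pyGetD (PySem.List.sorted values (fun x => x) false) (count - 1) 0
            = (PySem.List.sorted values (fun x => x) false)[count.toNat - 1]'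
              (by rw [PySem.List.length_sorted]; omega) := by
          rw [PySem.List.pyGetD_eq_getElem _ _ (by omega)
            (by rw [PySem.List.length_sorted]; omega)]
          congr 1
          omega
        rw [hget]
        congr 1
        omega
      · -- count ≥ n: k = n, all elements removed
        replace hlt : (values.length : Int) ≤ count := by omega
        have hmain := main_lemma (values.length - 1) values (by omega)
        simp only [show values.length - 1 + 1 = values.length from by omega] at hmain
        have hsplit : iterA count.toNat values = iterA values.length values := by
          have hz : (iterA values.length values) = [] := by
            have := length_iterA values.length values le_rfl
            simpa [List.length_eq_zero_iff] using this
          rw [show count.toNat = values.length + (count.toNat - values.length) by omega,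
            iterA_add, hz, iterA_nil]
        rw [hA, hlenR, hsplit, hmain]
        simp only [removeMinimum_alt]
        rw [if_neg (not_lt.mpr hlt), if_neg (by omega)]
        have hget : PySem.List.pyGetD (PySem.List.sorted values (fun x => x) false)
            ((values.length : Int) - 1) 0
            = (PySem.List.sorted values (fun x => x) false)[values.length - 1]'
              (by rw [PySem.List.length_sorted]; omega) := by
          rw [PySem.List.pyGetD_eq_getElem _ _ (by omega)
            (by rw [PySem.List.length_sorted]; omega)]
          congr 1
          omega
        rw [hget]
        congr 1
        omega

-- ===== VERDICT (by name: the statement is the Claim_ definition above) =====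
theorem removeMinimum_spec : Claim_equal_removeMinimum := by
  intro values count _
  show removeMinimum values count = removeMinimum_alt values count
  exact main_glue values count
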